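-- pv_equiv track=rewrite | github.com/Jasson-01/UBA-IP-2024 | Finales/implementaciones-codigo-Finales/ejerciciosPY-Final.py | mayorPrimoRepetido
-- ===== SOURCE A (Python) =====
-- def pertenece(e:int,l:list[int])->bool:
--     for elem in l:
--         if e == elem :
--            return True
--     return False
--
-- def sinRepetidos(l:list[int])->list[int]:
--     nueva_lista:list[int] = []
--     for i in range(len(l)):
--         if not(pertenece(l[i],nueva_lista)):
--             nueva_lista.append(l[i])
--     return nueva_lista
--
-- def es_primo(e:int) -> bool:
--     if e < 2:
--         return False
--     listaDivisores = []
--     contador = e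
--     for i in range(1,e+1):
--         if e % i == 0 :
--            listaDivisores.append(i)
--     if len(listaDivisores) > 2:
--         return False
--     else:
--         return True
--
-- def primos(l:list[int])->list[int]:
--     lista_primos = []
--     for e in l :
--         if es_primo(e) :
--             lista_primos.append(e)
--     return lista_primos
--
-- def cantidadRepeticiones(e:int,l:list[int])->int:
--     contador = 0
--     for elem in l :
--         if e == elem :
--             contador += 1
--     return contador
--
-- def mayorPrimoRepetido(l:list[int])->int:
--     listaTuplas: list[tuple[int,int]] = []
--     listaDePrimos: list[int] = sinRepetidos(primos(l))
--
--     for e in listaDePrimos: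
--         listaTuplas.append((e,cantidadRepeticiones(e,l)))
--
--     actual_mayor = listaTuplas[0]
--     for i in range(len(listaTuplas)):
--         if listaTuplas[i][1] >= actual_mayor[1] :
--             actual_mayor = listaTuplas[i]
--     return actual_mayor[0]
-- ===== SOURCE B (Python) =====
-- def _esPrimo(e):
--     if e < 2:
--         return False
--     i = 2
--     while i * i <= e:
--         if e % i == 0:
--             return False
--         i += 1
--     return True
--
-- def mayorPrimoRepetido(l):
--     counts = {}
--     for e in l:
--         counts[e] = counts.get(e, 0) + 1
--     best = None
--     for e, c in counts.items():
--         if _esPrimo(e):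
--             if best is None or c >= best[1]:
--                 best = (e, c)
--     return best[0]
-- ===== Notes on version B (the rewrite author's own statement) =====
-- stated objective: faster
-- what changed: One-pass dict counting of all elements plus sqrt trial-division primality replaces A's quadratic dedup/recount passes and its enumerate-all-divisors primality test; max is tracked in insertion order with >= so the last-wins tie-break is preserved.
import Mathlib
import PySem

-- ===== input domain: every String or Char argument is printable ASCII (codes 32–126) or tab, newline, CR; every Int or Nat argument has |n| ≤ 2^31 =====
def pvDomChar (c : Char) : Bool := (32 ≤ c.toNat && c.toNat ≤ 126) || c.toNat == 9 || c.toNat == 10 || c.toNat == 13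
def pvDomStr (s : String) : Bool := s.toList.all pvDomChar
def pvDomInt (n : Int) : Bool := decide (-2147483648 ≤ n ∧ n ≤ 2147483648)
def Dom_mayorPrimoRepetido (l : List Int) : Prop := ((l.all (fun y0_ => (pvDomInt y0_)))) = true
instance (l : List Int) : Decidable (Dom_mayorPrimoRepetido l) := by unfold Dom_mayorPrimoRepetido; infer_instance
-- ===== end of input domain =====

-- B replaces A's quadratic dedup/recount passes and divisor-enumeration primality by one dict-counting
-- pass plus sqrt trial division (fewer operations by algorithm; same value, last-wins tie-break preserved).


-- ===== PORT A =====
def pertenece (e : Int) (l : List Int) : Bool :=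
  match l with
  | [] => false
  | elem :: rest => if e == elem then true else pertenece e rest

def sinRepetidos (l : List Int) : List Int :=
  l.foldl (fun nueva x => if !(pertenece x nueva) then nueva ++ [x] else nueva) []

def esPrimo (e : Int) : Bool :=
  if e < 2 then false
  else
    let listaDivisores := (PySem.List.pyRange 1 (e + 1) 1).foldl
      (fun acc i => if PySem.Int.mod e i == 0 then acc ++ [i] else acc) []
    if listaDivisores.length > 2 then false else true

def primos (l : List Int) : List Int :=
  l.foldl (fun acc e => if esPrimo e then acc ++ [e] else acc) []

def cantidadRepeticiones (e : Int) (l : List Int) : Int :=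
  l.foldl (fun contador elem => if e == elem then contador + 1 else contador) 0

def mayorPrimoRepetido (l : List Int) : Int :=
  let listaDePrimos := sinRepetidos (primos l)
  let listaTuplas := listaDePrimos.foldl
    (fun acc e => acc ++ [(e, cantidadRepeticiones e l)]) ([] : List (Int × Int))
  match listaTuplas with
  | [] => 0   -- Python raises IndexError (listaTuplas[0]) here; excluded by Pre_
  | t0 :: _ =>
    (listaTuplas.foldl (fun actual t => if t.2 ≥ actual.2 then t else actual) t0).1

-- ===== PORT B =====
-- while i * i <= e: trial division loop of Source B's _esPrimo
def esPrimoAltGo (e i : Int) : Bool :=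
  if _h : i * i ≤ e then
    (if PySem.Int.mod e i == 0 then false else esPrimoAltGo e (i + 1))
  else true
termination_by (e + 1 - i).toNat
decreasing_by
  have hi : i ≤ e := by nlinarith
  omega

def esPrimoAlt (e : Int) : Bool :=
  if e < 2 then false else esPrimoAltGo e 2

def mayorPrimoRepetido_alt (l : List Int) : Int :=
  let counts := l.foldl (fun d e => d.insert e (d.getD e 0 + 1))
    (PySem.Dict.empty : PySem.Dict Int Int)
  let best := counts.items.foldl
    (fun best ec =>
      if esPrimoAlt ec.1 then
        match best with
        | none => some ec
        | some b => if ec.2 ≥ b.2 then some ec else some b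
      else best) (none : Option (Int × Int))
  match best with
  | some b => b.1
  | none => 0   -- Python raises TypeError (best[0] with best None) here; excluded by Pre_

-- ===== PRECONDITION & SPEC =====
-- Pre_ excludes exactly the inputs with no prime element, where the Python A raises IndexError
-- (and Source B raises TypeError).
def Pre_mayorPrimoRepetido (l : List Int) : Prop := ∃ e ∈ l, 2 ≤ e ∧ Nat.Prime e.toNat
instance (l : List Int) : Decidable (Pre_mayorPrimoRepetido l) := by
  unfold Pre_mayorPrimoRepetido; infer_instance
def pvWitness_mayorPrimoRepetido : List Int := [2, 3, 3]

def Spec_mayorPrimoRepetido (l : List Int) (out : Int) : Prop := out = mayorPrimoRepetido_alt l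
instance (l : List Int) (out : Int) : Decidable (Spec_mayorPrimoRepetido l out) := by
  unfold Spec_mayorPrimoRepetido; infer_instance

-- ===== CLAIM (what is proved, stated in full; the proofs are below) =====
def Claim_equal_mayorPrimoRepetido : Prop :=
  ∀ (l : List Int), Dom_mayorPrimoRepetido l → Pre_mayorPrimoRepetido l →
    Spec_mayorPrimoRepetido l (mayorPrimoRepetido l)

-- ===== LEMMAS AND PROOFS =====

theorem go_iff (e : Int) (i : Int) (h2 : 2 ≤ i) :
    esPrimoAltGo e i = true ↔ ∀ j : Int, i ≤ j → j * j ≤ e → ¬ j ∣ e := by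
  fun_induction esPrimoAltGo e i with
  | case1 i hle hmod =>
    have hdvd : i ∣ e := by
      rw [← PySem.Int.mod_eq_zero_iff_dvd]; exact beq_iff_eq.mp hmod
    simp only [Bool.false_eq_true, false_iff]
    intro hall
    exact hall i le_rfl hle hdvd
  | case2 i hle hmod ih =>
    have hnd : ¬ i ∣ e := by
      rw [← PySem.Int.mod_eq_zero_iff_dvd]
      simpa using hmod
    rw [ih (by omega)]
    constructor
    · intro hall j hij hjj
      rcases eq_or_lt_of_le hij with rfl | hlt
      · exact hnd
      · exact hall j (by omega) hjj
    · intro hall j hij hjj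
      exact hall j (by omega) hjj
  | case3 i hle =>
    simp only [true_iff]
    intro j hij hjj hdvd
    have : i * i ≤ j * j := by nlinarith
    omega

theorem prim_b (e : Int) : esPrimoAlt e = decide (2 ≤ e ∧ Nat.Prime e.toNat) := by
  unfold esPrimoAlt
  by_cases h : e < 2
  · simp [h, show ¬(2 ≤ e) by omega]
  · push Not at h
    have hn : (e.toNat : Int) = e := Int.toNat_of_nonneg (by omega)
    rw [if_neg (by omega)]
    have key : esPrimoAltGo e 2 = true ↔ Nat.Prime e.toNat := by
      rw [go_iff e 2 le_rfl, Nat.prime_def_le_sqrt]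
      constructor
      · intro hall
        refine ⟨by omega, ?_⟩
        intro m h2m hms hdvd
        have hms' : m * m ≤ e.toNat := Nat.le_sqrt.mp hms
        have hmm : (m : Int) * (m : Int) ≤ e := by rw [← hn]; exact_mod_cast hms'
        have hdvd' : (m : Int) ∣ e := by rw [← hn]; exact_mod_cast hdvd
        exact hall (m : Int) (by exact_mod_cast h2m) hmm hdvd'
      · rintro ⟨-, hall⟩ j h2j hjj hdvd
        have hj : (j.toNat : Int) = j := Int.toNat_of_nonneg (by omega)
        have hjj' : j.toNat * j.toNat ≤ e.toNat := by
          have : (j.toNat : Int) * (j.toNat : Int) ≤ (e.toNat : Int) := by rw [hj, hn]; exact hjj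
          exact_mod_cast this
        have hdvd' : j.toNat ∣ e.toNat := by
          have : (j.toNat : Int) ∣ (e.toNat : Int) := by rw [hj, hn]; exact hdvd
          exact_mod_cast this
        exact hall j.toNat (by omega) (Nat.le_sqrt.mpr hjj') hdvd'
    rw [Bool.eq_iff_iff, key]
    simp [h]

theorem pyRange_one_nodup (a b : Int) : (PySem.List.pyRange a b 1).Nodup := by
  rw [PySem.List.pyRange_of_pos a b one_pos]
  exact (List.nodup_range).map (fun x y h => by omega)

theorem prim_a (e : Int) : esPrimo e = decide (2 ≤ e ∧ Nat.Prime e.toNat) := by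
  unfold esPrimo
  by_cases h : e < 2
  · simp [h, show ¬(2 ≤ e) by omega]
  · push Not at h
    rw [if_neg (by omega)]
    simp only [PySem.List.foldl_append_if_eq_filter, List.nil_append]
    set p : Int → Bool := fun i => PySem.Int.mod e i == 0 with hp
    set D := (PySem.List.pyRange 1 (e + 1) 1).filter p with hD
    have hmem : ∀ x : Int, x ∈ D ↔ (1 ≤ x ∧ x ≤ e) ∧ x ∣ e := by
      intro x
      rw [hD, List.mem_filter, PySem.List.mem_pyRange_one, hp]
      simp only [beq_iff_eq, PySem.Int.mod_eq_zero_iff_dvd]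
      constructor <;> rintro ⟨⟨h1, h2⟩, h3⟩ <;> exact ⟨⟨h1, by omega⟩, h3⟩
    have hnd : D.Nodup := (pyRange_one_nodup 1 (e + 1)).filter p
    have hcard : D.length = D.toFinset.card := (List.toFinset_card_of_nodup hnd).symm
    have hn : (e.toNat : Int) = e := Int.toNat_of_nonneg (by omega)
    rw [Bool.eq_iff_iff]
    have hiff : D.length ≤ 2 ↔ Nat.Prime e.toNat := by
      constructor
      · intro hlen
        by_contra hnp
        obtain ⟨m, hdvd, h2m, hme⟩ := Nat.exists_dvd_of_not_prime2 (by omega) hnp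
        have hd1 : (1 : Int) ∈ D := (hmem 1).mpr ⟨⟨le_rfl, by omega⟩, one_dvd e⟩
        have hdm : (m : Int) ∈ D := by
          refine (hmem m).mpr ⟨⟨by exact_mod_cast Nat.one_le_iff_ne_zero.mpr (by omega), by omega⟩, ?_⟩
          rw [← hn]; exact_mod_cast hdvd
        have hde : e ∈ D := (hmem e).mpr ⟨⟨by omega, le_rfl⟩, dvd_refl e⟩
        have hsub : ({1, (m : Int), e} : Finset Int) ⊆ D.toFinset := by
          intro x hx
          simp only [Finset.mem_insert, Finset.mem_singleton] at hx
          rcases hx with rfl | rfl | rfl <;> simpa [List.mem_toFinset] using (by assumption : _ ∈ D)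
        have hc3 : ({1, (m : Int), e} : Finset Int).card = 3 := by
          rw [Finset.card_insert_of_notMem, Finset.card_insert_of_notMem, Finset.card_singleton]
          · simp; omega
          · simp; constructor <;> omega
        have := Finset.card_le_card hsub
        omega
      · intro hpr
        have hsub : D.toFinset ⊆ ({1, e} : Finset Int) := by
          intro x hx
          rw [List.mem_toFinset, hmem] at hx
          obtain ⟨⟨h1x, hxe⟩, hdvd⟩ := hx
          have hdvd' : x.toNat ∣ e.toNat := by
            have hx' : (x.toNat : Int) = x := Int.toNat_of_nonneg (by omega)
            have : (x.toNat : Int) ∣ (e.toNat : Int) := by rw [hx', hn]; exact hdvd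
            exact_mod_cast this
          rcases (Nat.Prime.eq_one_or_self_of_dvd hpr _ hdvd') with h1 | hself
          · have : x = 1 := by omega
            simp [this]
          · have : x = e := by omega
            simp [this]
        have hle : D.toFinset.card ≤ 2 :=
          le_trans (Finset.card_le_card hsub) (le_trans (Finset.card_insert_le _ _) (by simp))
        omega
    constructor
    · intro hif
      by_cases hl : D.length > 2
      · rw [if_pos hl] at hif; exact absurd hif (by simp)
      · exact decide_eq_true_eq.mpr ⟨h, hiff.mp (by omega)⟩
    · intro hd
      have hpr := (decide_eq_true_eq.mp hd).2
      have hlen : D.length ≤ 2 := hiff.mpr hpr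
      rw [if_neg (by omega : ¬ D.length > 2)]

theorem prim_ab (e : Int) : esPrimo e = esPrimoAlt e := by rw [prim_a, prim_b]

theorem pertenece_eq (e : Int) (l : List Int) : pertenece e l = decide (e ∈ l) := by
  induction l with
  | nil => simp [pertenece]
  | cons x xs ih =>
    by_cases h : e = x <;> simp [pertenece, h, ih]

theorem sinRepetidos_eq (l : List Int) : sinRepetidos l = PySem.Set.ofList l := by
  unfold sinRepetidos
  rw [PySem.List.foldl_congr_mem l _ PySem.Set.add [] ?_, ← PySem.Set.ofList_eq_foldl]
  intro acc x _
  rw [pertenece_eq, PySem.Set.add_eq_ite]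
  by_cases hx : x ∈ acc <;> simp [hx]

theorem primos_eq (l : List Int) : primos l = l.filter esPrimo := by
  unfold primos
  rw [PySem.List.foldl_append_if_eq_filter, List.nil_append]

theorem cant_eq (e : Int) (l : List Int) : cantidadRepeticiones e l = (l.count e : Int) := by
  unfold cantidadRepeticiones
  rw [PySem.List.foldl_congr_mem l _ (fun acc x => if x == e then acc + 1 else acc) 0 ?_,
    PySem.List.foldl_beq_add_one, zero_add]
  intro acc x _
  by_cases h : x = e <;> simp [h, Ne.symm]

theorem discard_filter (s : PySem.Set Int) (x : Int) (p : Int → Bool) :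
    PySem.Set.discard (s.filter p) x = (PySem.Set.discard s x).filter p := by
  simp only [PySem.Set.discard]
  rw [List.filter_comm]

theorem ofList_filter (p : Int → Bool) (l : List Int) :
    PySem.Set.ofList (l.filter p) = (PySem.Set.ofList l).filter p := by
  induction l with
  | nil => rfl
  | cons x xs ih =>
    by_cases hp : p x
    · rw [List.filter_cons_of_pos hp, PySem.Set.ofList_cons, PySem.Set.ofList_cons,
        List.filter_cons_of_pos hp, ih, discard_filter]
    · rw [List.filter_cons_of_neg (by simpa using hp), ih, PySem.Set.ofList_cons,
        List.filter_cons_of_neg (by simpa using hp), ← discard_filter]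
      symm
      simp only [PySem.Set.discard]
      refine List.filter_eq_self.mpr ?_
      intro a ha
      rcases List.mem_filter.mp ha with ⟨-, hpa⟩
      have hax : a ≠ x := by
        intro h
        subst h
        exact hp (by simpa using hpa)
      simp [hax]

theorem bfold (items : List (Int × Int)) (acc : Option (Int × Int)) :
    items.foldl (fun best ec =>
      if esPrimoAlt ec.1 then
        match best with
        | none => some ec
        | some b => if ec.2 ≥ b.2 then some ec else some b
      else best) acc
    = (items.filter (fun ec => esPrimoAlt ec.1)).foldl (fun best ec =>
        match best with
        | none => some ec
        | some b => if ec.2 ≥ b.2 then some ec else some b) acc := by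
  induction items generalizing acc with
  | nil => rfl
  | cons t ts ih =>
    by_cases h : esPrimoAlt t.1 <;>
      simp only [List.foldl_cons, List.filter_cons, h, if_pos, ih]; rfl

theorem opt_fold (rest : List (Int × Int)) (b : Int × Int) :
    rest.foldl (fun acc ec =>
        match acc with
        | none => some ec
        | some b => if ec.2 ≥ b.2 then some ec else some b) (some b) =
      some (rest.foldl (fun actual t => if t.2 ≥ actual.2 then t else actual) b) := by
  induction rest generalizing b with
  | nil => rfl
  | cons t ts ih =>
    have hstep : (match some b with
        | none => some t
        | some b => if t.2 ≥ b.2 then some t else some b)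
        = some (if t.2 ≥ b.2 then t else b) := by
      by_cases h : t.2 ≥ b.2 <;> simp [h]
    rw [List.foldl_cons, List.foldl_cons, hstep, ih]

-- ===== VERDICT (by name: the statement is the Claim_ definition above) =====
theorem mayorPrimoRepetido_spec : Claim_equal_mayorPrimoRepetido := by
  intro l _ hpre
  unfold Spec_mayorPrimoRepetido
  obtain ⟨e, hel, h2e, hpr⟩ := hpre
  have hPe : esPrimo e = true := by rw [prim_a]; simp [h2e, hpr]
  unfold mayorPrimoRepetido mayorPrimoRepetido_alt
  simp only [PySem.List.foldl_append_singleton_eq_map, List.nil_append,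
    PySem.Dict.foldl_insert_getD_add_one_eq_counter, PySem.Dict.items_counter,
    primos_eq, sinRepetidos_eq]
  rw [bfold, List.filter_map]
  have hfun' : (fun x : Int => (x, cantidadRepeticiones x l))
      = (fun k : Int => (k, (l.count k : Int))) := by
    funext x; rw [cant_eq]
  have hsets' : ((PySem.Set.ofList l).filter
        ((fun ec : Int × Int => esPrimoAlt ec.1) ∘ fun k : Int => (k, (l.count k : Int))))
      = PySem.Set.ofList (l.filter esPrimo) := by
    rw [show ((fun ec : Int × Int => esPrimoAlt ec.1) ∘ fun k : Int => (k, (l.count k : Int)))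
        = esPrimoAlt from rfl, ofList_filter]
    congr 1
    funext x
    exact (prim_ab x).symm
  rw [hfun', hsets']
  have hne : e ∈ PySem.Set.ofList (l.filter esPrimo) :=
    (PySem.Set.mem_ofList _ _).mpr (List.mem_filter.mpr ⟨hel, hPe⟩)
  have hnil : PySem.Set.ofList (l.filter esPrimo) ≠ [] := by
    intro h; rw [h] at hne; exact absurd hne (List.not_mem_nil)
  generalize hts : (PySem.Set.ofList (l.filter esPrimo)).map
      (fun k : Int => (k, (l.count k : Int))) = ts
  cases ts with
  | nil =>
    exact absurd (List.map_eq_nil_iff.mp hts) hnil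
  | cons t0 rest =>
    simp only [List.foldl_cons]
    rw [opt_fold, if_pos (le_refl t0.2)]
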